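-- pv_equiv track=rewrite | github.com/ba-00001/TIP-101-SPRING2-26 | week-3-session-1-and-session-2.py | sum_of_unique_elements
-- ===== SOURCE A (Python) =====
-- def sum_of_unique_elements(lst1, lst2):
--     freq = {}
--     for num in lst1:
--         freq[num] = freq.get(num, 0) + 1
--
--     lst2_set = set(lst2)
--     total = 0
--
--     for num in lst1:
--         if freq[num] == 1 and num not in lst2_set:
--             total += num
--
--     return total
-- ===== SOURCE B (Python) =====
-- def sum_of_unique_elements(lst1, lst2):
--     excluded = set(lst2)
--     s = sorted(lst1)
--     total = 0
--     i = 0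
--     n = len(s)
--     while i < n:
--         j = i + 1
--         while j < n and s[j] == s[i]:
--             j += 1
--         if j == i + 1 and s[i] not in excluded:
--             total += s[i]
--         i = j
--     return total
-- ===== Notes on version B (the rewrite author's own statement) =====
-- stated objective: alternative
-- what changed: Sort-then-scan instead of hash counting: B sorts lst1 and walks runs of equal elements with two indices, adding singleton runs not excluded by set(lst2); no frequency dictionary and no second scan of lst1.
import Mathlib
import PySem

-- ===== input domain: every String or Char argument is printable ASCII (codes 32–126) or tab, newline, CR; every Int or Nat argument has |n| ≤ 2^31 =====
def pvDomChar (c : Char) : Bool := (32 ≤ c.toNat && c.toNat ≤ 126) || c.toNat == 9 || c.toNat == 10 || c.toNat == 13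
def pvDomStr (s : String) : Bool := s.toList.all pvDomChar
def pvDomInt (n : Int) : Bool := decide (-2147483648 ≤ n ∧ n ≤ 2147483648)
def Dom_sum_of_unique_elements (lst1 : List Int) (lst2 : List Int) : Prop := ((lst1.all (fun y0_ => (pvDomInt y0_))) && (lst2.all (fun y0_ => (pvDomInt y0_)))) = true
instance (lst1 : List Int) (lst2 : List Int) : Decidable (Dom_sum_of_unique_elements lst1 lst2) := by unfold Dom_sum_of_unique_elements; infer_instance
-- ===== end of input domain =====

-- B replaces A's frequency dictionary by sort-then-scan over runs of equal elements; alternative algorithm, same result.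

-- ===== PORT A =====
-- freq[num] is ported as getD freq num 0 — exact here, since num ∈ lst1 guarantees the key is present.
def sum_of_unique_elements (lst1 : List Int) (lst2 : List Int) : Int :=
  let freq : PySem.Dict Int Int :=
    lst1.foldl (fun d num => d.insert num (d.getD num 0 + 1)) PySem.Dict.empty
  let lst2_set : PySem.Set Int := PySem.Set.ofList lst2
  lst1.foldl (fun total num =>
    if freq.getD num 0 == 1 && !(PySem.Set.contains lst2_set num) then total + num else total) 0

-- ===== PORT B =====
-- B's outer while loop consumes the sorted list run by run: the inner 'while s[j]==s[i]' is the
-- takeWhile/dropWhile split of the leading run; 'j == i+1' is 'the run after the head is empty'.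
def pvScanRuns (excluded : PySem.Set Int) (s : List Int) : Int :=
  match s with
  | [] => 0
  | x :: t =>
      (if (t.takeWhile (fun y => y == x)).length == 0 && !(PySem.Set.contains excluded x)
        then x else 0)
      + pvScanRuns excluded (t.dropWhile (fun y => y == x))
termination_by s.length
decreasing_by
  exact Nat.lt_succ_of_le (t.dropWhile_sublist (fun y => y == x)).length_le

def sum_of_unique_elements_alt (lst1 : List Int) (lst2 : List Int) : Int :=
  let excluded : PySem.Set Int := PySem.Set.ofList lst2
  let s := PySem.List.sorted lst1 (fun x => x) false
  pvScanRuns excluded s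

-- ===== PRECONDITION & SPEC =====
def Spec_sum_of_unique_elements (lst1 : List Int) (lst2 : List Int) (out : Int) : Prop := out = sum_of_unique_elements_alt lst1 lst2
instance (lst1 : List Int) (lst2 : List Int) (out : Int) : Decidable (Spec_sum_of_unique_elements lst1 lst2 out) := by unfold Spec_sum_of_unique_elements; infer_instance

-- ===== CLAIM (what is proved, stated in full; the proofs are below) =====
def Claim_equal_sum_of_unique_elements : Prop := ∀ (lst1 : List Int) (lst2 : List Int), Dom_sum_of_unique_elements lst1 lst2 → Spec_sum_of_unique_elements lst1 lst2 (sum_of_unique_elements lst1 lst2)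

-- ===== LEMMAS AND PROOFS =====

-- 'for x in l: if p x: total += x' is the sum of the filtered list
theorem foldl_if_add_eq_sum_filter (l : List Int) (p : Int → Bool) (a : Int) :
    l.foldl (fun t x => if p x then t + x else t) a = a + (l.filter p).sum := by
  induction l generalizing a with
  | nil => simp
  | cons x xs ih =>
    by_cases h : p x
    · simp [h, ih]; ring
    · simp [h, ih]

-- on a ≤-sorted list, the run scan sums exactly the elements whose count in that list is 1
theorem pvScanRuns_sorted (ex : PySem.Set Int) :
    ∀ (s : List Int), s.Pairwise (· ≤ ·) →
      pvScanRuns ex s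
        = (s.filter (fun x => (s.count x == 1) && !(PySem.Set.contains ex x))).sum := by
  intro s
  induction s using pvScanRuns.induct with
  | case1 => intro _; simp [pvScanRuns]
  | case2 x t ih =>
    intro hsorted
    have hsplit : t = t.takeWhile (fun y => y == x) ++ t.dropWhile (fun y => y == x) :=
      (List.takeWhile_append_dropWhile).symm
    set run := t.takeWhile (fun y => y == x) with hrun
    set rest := t.dropWhile (fun y => y == x) with hrest
    have hrun_eq : ∀ y ∈ run, y = x := by
      intro y hy
      rw [hrun] at hy
      have hp : (fun y => y == x) y = true := List.mem_takeWhile_imp (p := fun y => y == x) hy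
      exact eq_of_beq hp
    have hx_le : ∀ y ∈ t, x ≤ y := by
      intro y hy; exact (List.pairwise_cons.mp hsorted).1 y hy
    have ht_sorted : t.Pairwise (· ≤ ·) := (List.pairwise_cons.mp hsorted).2
    have hrest_sorted : rest.Pairwise (· ≤ ·) :=
      List.Pairwise.sublist (t.dropWhile_sublist (fun y => y == x)) ht_sorted
    -- x does not occur in rest
    have hx_not_rest : x ∉ rest := by
      intro hmem
      rcases hr : rest with _ | ⟨z, rt⟩
      · simp [hr] at hmem
      · have hz : ¬ (z == x) = true := by
          have hd : t.dropWhile (fun y => y == x) = z :: rt := (hrest.symm).trans hr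
          have h0 := List.head?_dropWhile_not (fun y => y == x) t
          rw [hd] at h0
          simp only [List.head?_cons] at h0
          simp [h0]
        have hz_ne : z ≠ x := by simpa using hz
        have hz_mem : z ∈ t.dropWhile (fun y => y == x) := by
          rw [(hrest.symm).trans hr]; simp
        have hz_le : x ≤ z := hx_le z ((t.dropWhile_sublist _).mem hz_mem)
        have hz_lt : x < z := lt_of_le_of_ne hz_le (Ne.symm hz_ne)
        rw [hr] at hmem
        rcases List.mem_cons.mp hmem with h1 | h1
        · exact absurd h1.symm hz_ne
        · have hzx : z ≤ x := (List.pairwise_cons.mp (hr ▸ hrest_sorted)).1 x h1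
          exact absurd hzx (not_le_of_gt hz_lt)
    -- counts
    have hcount_x : (x :: t).count x = 1 + run.length := by
      rw [List.count_cons_self, hsplit, List.count_append]
      have h1 : run.count x = run.length := by
        rw [List.count_eq_length]; intro y hy; exact ((hrun_eq y hy).symm ▸ rfl)
      have h2 : rest.count x = 0 := List.count_eq_zero.mpr hx_not_rest
      rw [h1, h2]; omega
    have hcount_ne : ∀ y, y ≠ x → (x :: t).count y = rest.count y := by
      intro y hy
      have hr0 : run.count y = 0 := by
        rw [List.count_eq_zero]; intro hm; exact hy (hrun_eq y hm)
      rw [hsplit]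
      simp [List.count_append, hr0, Ne.symm hy]
    have hfilter_rest :
        rest.filter (fun y => ((x :: t).count y == 1) && !(PySem.Set.contains ex y))
          = rest.filter (fun y => (rest.count y == 1) && !(PySem.Set.contains ex y)) := by
      apply List.filter_congr
      intro y hy
      have hy_ne : y ≠ x := by rintro rfl; exact hx_not_rest hy
      rw [hcount_ne y hy_ne]
    have hfilter_run :
        run.filter (fun y => ((x :: t).count y == 1) && !(PySem.Set.contains ex y))
          = [] := by
      rw [List.filter_eq_nil_iff]
      intro y hy
      have hyx : y = x := hrun_eq y hy
      subst hyx
      have hlen : 1 ≤ run.length := List.length_pos_of_mem hy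
      simp only [Bool.and_eq_true, beq_iff_eq, not_and]
      intro hc
      rw [hcount_x] at hc
      omega
    have hIH := ih hrest_sorted
    rw [pvScanRuns, ← hrun, ← hrest, hIH]
    have ht_filter :
        t.filter (fun y => ((x :: t).count y == 1) && !(PySem.Set.contains ex y))
          = rest.filter (fun y => (rest.count y == 1) && !(PySem.Set.contains ex y)) := by
      have h0 : t.filter (fun y => ((x :: t).count y == 1) && !(PySem.Set.contains ex y))
          = (run ++ rest).filter (fun y => ((x :: t).count y == 1) && !(PySem.Set.contains ex y)) := by
        rw [← hsplit]
      rw [h0, List.filter_append, hfilter_run, hfilter_rest, List.nil_append]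
    rw [List.filter_cons, ht_filter]
    have hcond : ((((x :: t).count x == 1) && !(PySem.Set.contains ex x)) : Bool)
        = (((run.length == 0) && !(PySem.Set.contains ex x)) : Bool) := by
      rw [hcount_x]
      by_cases h : run.length = 0
      · simp [h]
      · have h1 : 1 + run.length ≠ 1 := by omega
        have e1 : ((1 + run.length == 1) : Bool) = false := by simpa using h1
        have e2 : ((run.length == 0) : Bool) = false := by simpa using h
        rw [e1, e2]
    rw [hcond]
    by_cases hc : ((run.length == 0) && !(PySem.Set.contains ex x)) = true
    · rw [if_pos hc, if_pos hc, List.sum_cons]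
    · rw [if_neg hc, if_neg hc, zero_add]

-- ===== VERDICT (by name: the statement is the Claim_ definition above) =====
theorem sum_of_unique_elements_spec : Claim_equal_sum_of_unique_elements := by
  unfold Claim_equal_sum_of_unique_elements
  intro lst1 lst2 _
  unfold Spec_sum_of_unique_elements sum_of_unique_elements sum_of_unique_elements_alt
  simp only [PySem.Dict.foldl_insert_getD_add_one_eq_counter, PySem.Dict.getD_counter]
  rw [foldl_if_add_eq_sum_filter, zero_add]
  set s := PySem.List.sorted lst1 (fun x => x) false with hs
  have hperm : s.Perm lst1 := PySem.List.sorted_perm lst1 (fun x => x) false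
  have hpair : s.Pairwise (· ≤ ·) := by
    have := PySem.List.sorted_pairwise lst1 (fun x => x)
    simpa using this
  rw [pvScanRuns_sorted (PySem.Set.ofList lst2) s hpair]
  have hpred : ∀ y, ((s.count y == 1) : Bool) = ((lst1.count y == 1) : Bool) := by
    intro y; rw [hperm.count_eq]
  have hfp : lst1.filter (fun num => ((lst1.count num : Int) == 1) && !(PySem.Set.contains (PySem.Set.ofList lst2) num))
      = lst1.filter (fun num => (lst1.count num == 1) && !(PySem.Set.contains (PySem.Set.ofList lst2) num)) := by
    apply List.filter_congr; intro y _
    congr 1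
    by_cases h : lst1.count y = 1
    · simp [h]
    · have h2 : ((lst1.count y : Int)) ≠ 1 := by exact_mod_cast h
      simp [h, h2]
  rw [hfp]
  have hfp2 : s.filter (fun y => (s.count y == 1) && !(PySem.Set.contains (PySem.Set.ofList lst2) y))
      = s.filter (fun y => (lst1.count y == 1) && !(PySem.Set.contains (PySem.Set.ofList lst2) y)) := by
    apply List.filter_congr; intro y _; rw [hpred]
  rw [hfp2]
  exact ((hperm.filter (fun y => (lst1.count y == 1) && !(PySem.Set.contains (PySem.Set.ofList lst2) y))).sum_eq).symm
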